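-- pv_equiv track=rewrite | github.com/open-formulieren/open-forms | src/openforms/prefill/__init__.py | _group_prefills_by_plugin
-- ===== SOURCE A (Python) =====
-- from itertools import groupby
-- from typing import TYPE_CHECKING, Any, Dict, List, Tuple
--
-- def _group_prefills_by_plugin(fields: List[Dict[str, str]]) -> Dict[str, list]:
--     grouper = {}
--
--     def keyfunc(item):
--         return item.get("plugin", "")
--
--     sorted_fields = sorted(fields, key=keyfunc)
--     for group, _fields in groupby(sorted_fields, key=keyfunc):
--         grouper[group] = [field["attribute"] for field in _fields]
--     return grouper
-- ===== SOURCE B (Python) =====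
-- def _group_prefills_by_plugin(fields):
--     grouper = {}
--     for field in fields:
--         grouper.setdefault(field.get("plugin", ""), []).append(field["attribute"])
--     return {plugin: grouper[plugin] for plugin in sorted(grouper)}
-- ===== Notes on version B (the rewrite author's own statement) =====
-- stated objective: simpler
-- what changed: Replaces sort-all-fields-then-groupby with a single-pass dict accumulation (setdefault/append, preserving original within-group order) followed by one sort of the distinct plugin keys.
import Mathlib
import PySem

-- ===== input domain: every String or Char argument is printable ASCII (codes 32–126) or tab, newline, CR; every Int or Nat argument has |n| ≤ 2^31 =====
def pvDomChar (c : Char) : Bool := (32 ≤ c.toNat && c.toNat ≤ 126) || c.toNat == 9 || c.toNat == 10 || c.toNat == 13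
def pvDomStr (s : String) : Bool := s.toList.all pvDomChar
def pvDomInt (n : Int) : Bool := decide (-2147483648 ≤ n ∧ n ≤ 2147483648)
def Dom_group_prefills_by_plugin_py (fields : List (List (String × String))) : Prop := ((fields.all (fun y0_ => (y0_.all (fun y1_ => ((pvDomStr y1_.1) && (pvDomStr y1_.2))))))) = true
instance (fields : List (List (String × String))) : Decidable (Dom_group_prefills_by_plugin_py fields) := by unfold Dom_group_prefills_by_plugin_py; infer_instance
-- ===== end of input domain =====

-- B restructures A (sort fields + groupby → one-pass dict accumulation + sort of the keys); equal return value on Pre_.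

-- ===== PORT A =====
-- keyfunc(item) = item.get("plugin", "")
def pvKey (field : List (String × String)) : String :=
  (PySem.Dict.mk field).getD "plugin" ""

-- field["attribute"]; Pre_ guarantees the key is present (Python raises KeyError otherwise)
def pvAttr (field : List (String × String)) : String :=
  (PySem.Dict.mk field).getD "attribute" ""

-- itertools.groupby(sorted_fields, key=keyfunc): consecutive runs of equal key (hand port, exact on lists)
-- itertools.groupby(sorted_fields, key=keyfunc): consecutive runs of equal key
-- (hand port, exact on lists; the Nat fuel, always ≥ the list length, only makes the recursion structural)
def pvRunsF : Nat → List (List (String × String)) → List (String × List (List (String × String)))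
  | _, [] => []
  | 0, _ :: _ => []
  | n + 1, x :: xs =>
      (pvKey x, x :: xs.takeWhile (fun y => pvKey y == pvKey x)) ::
        pvRunsF n (xs.dropWhile (fun y => pvKey y == pvKey x))

def pvRuns (l : List (List (String × String))) : List (String × List (List (String × String))) :=
  pvRunsF l.length l

def group_prefills_by_plugin_py (fields : List (List (String × String))) : List (String × List String) :=
  let sortedFields := PySem.List.sorted fields pvKey
  let grouper := (pvRuns sortedFields).foldl
    (fun d r => d.insert r.1 (r.2.map pvAttr)) PySem.Dict.empty
  grouper.items

-- ===== PORT B =====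
def group_prefills_by_plugin_py_alt (fields : List (List (String × String))) : List (String × List String) :=
  let grouper := fields.foldl
    (fun d f => d.modify (pvKey f) [] (fun v => v ++ [pvAttr f])) PySem.Dict.empty
  (PySem.List.sorted grouper.keys (fun k => k)).map (fun k => (k, grouper.getD k []))

-- ===== PRECONDITION & SPEC =====
-- Pre_ excludes exactly the inputs where a field lacks the "attribute" key: there Python A (and B) raise KeyError.
def Pre_group_prefills_by_plugin_py (fields : List (List (String × String))) : Prop :=
  ∀ f ∈ fields, (PySem.Dict.mk f).contains "attribute" = true
instance (fields : List (List (String × String))) : Decidable (Pre_group_prefills_by_plugin_py fields) := by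
  unfold Pre_group_prefills_by_plugin_py; infer_instance

def pvWitness_group_prefills_by_plugin_py : (List (List (String × String))) :=
  [[("plugin", "x"), ("attribute", "a")], [("attribute", "b")]]

def Spec_group_prefills_by_plugin_py (fields : List (List (String × String))) (out : List (String × List String)) : Prop := out = group_prefills_by_plugin_py_alt fields
instance (fields : List (List (String × String))) (out : List (String × List String)) : Decidable (Spec_group_prefills_by_plugin_py fields out) := by unfold Spec_group_prefills_by_plugin_py; infer_instance

-- ===== CLAIM (what is proved, stated in full; the proofs are below) =====
def Claim_equal_group_prefills_by_plugin_py : Prop := ∀ (fields : List (List (String × String))), Dom_group_prefills_by_plugin_py fields → Pre_group_prefills_by_plugin_py fields → Spec_group_prefills_by_plugin_py fields (group_prefills_by_plugin_py fields)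

-- ===== LEMMAS AND PROOFS =====

-- the fuel is irrelevant once it covers the length
theorem pvRunsF_eq (n : Nat) : ∀ l, l.length ≤ n → pvRunsF n l = pvRuns l := by
  induction n using Nat.strong_induction_on with
  | _ n ih =>
    intro l h
    cases l with
    | nil => cases n <;> rfl
    | cons x xs =>
      cases n with
      | zero => simp at h
      | succ m =>
        have hxs : xs.length ≤ m := by simp at h; omega
        have hd : (xs.dropWhile (fun y => pvKey y == pvKey x)).length ≤ m :=
          le_trans (List.length_dropWhile_le _ _) hxs
        show _ :: pvRunsF m _ = pvRuns (x :: xs)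
        rw [ih m (by omega) _ hd]
        unfold pvRuns
        simp only [List.length_cons, pvRunsF]
        rw [ih xs.length (by omega) _ (List.length_dropWhile_le _ _)]
        rfl

theorem pvRuns_cons (x : List (String × String)) (xs : List (List (String × String))) :
    pvRuns (x :: xs) =
      (pvKey x, x :: xs.takeWhile (fun y => pvKey y == pvKey x)) ::
        pvRuns (xs.dropWhile (fun y => pvKey y == pvKey x)) := by
  show pvRunsF (xs.length + 1) (x :: xs) = _
  simp only [pvRunsF]
  rw [pvRunsF_eq _ _ (List.length_dropWhile_le _ _)]

-- induction along the run structure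
theorem pvRuns_induct {P : List (List (String × String)) → Prop} (h0 : P [])
    (h1 : ∀ x xs, P (xs.dropWhile (fun y => pvKey y == pvKey x)) → P (x :: xs))
    (l : List (List (String × String))) : P l := by
  have main : ∀ n l, l.length ≤ n → P l := by
    intro n
    induction n with
    | zero =>
      intro l h
      cases l with
      | nil => exact h0
      | cons x xs => simp at h
    | succ n ih =>
      intro l h
      cases l with
      | nil => exact h0
      | cons x xs =>
        refine h1 x xs (ih _ ?_)
        have := List.length_dropWhile_le (fun y => pvKey y == pvKey x) xs
        simp at h; omega

  exact main l.length l le_rfl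

theorem pv_insertBy_pairwise (x : List (String × String)) (acc : List (List (String × String)))
    (h : acc.Pairwise (fun a b => pvKey a ≤ pvKey b)) :
    (PySem.List.insertBy (fun a b => decide (pvKey a < pvKey b)) x acc).Pairwise
      (fun a b => pvKey a ≤ pvKey b) := by
  induction acc with
  | nil => simp [PySem.List.insertBy]
  | cons y ys ih =>
    rw [List.pairwise_cons] at h
    obtain ⟨hy, hys⟩ := h
    simp only [PySem.List.insertBy]
    split_ifs with hlt
    · simp only [decide_eq_true_eq] at hlt
      refine List.pairwise_cons.mpr ⟨?_, List.pairwise_cons.mpr ⟨hy, hys⟩⟩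
      intro b hb
      rcases List.mem_cons.mp hb with rfl | hb
      · exact le_of_lt hlt
      · exact le_trans (le_of_lt hlt) (hy _ hb)
    · simp only [decide_eq_true_eq, not_lt] at hlt
      refine List.pairwise_cons.mpr ⟨?_, ih hys⟩
      intro b hb
      rcases (PySem.List.mem_insertBy _ _ _ _).mp hb with rfl | hb
      · exact hlt
      · exact hy _ hb

theorem pv_insertBy_filter_key (x : List (String × String)) (acc : List (List (String × String)))
    (c : String) (h : acc.Pairwise (fun a b => pvKey a ≤ pvKey b)) :
    (PySem.List.insertBy (fun a b => decide (pvKey a < pvKey b)) x acc).filter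
        (fun f => pvKey f == c) =
      acc.filter (fun f => pvKey f == c) ++ (if pvKey x == c then [x] else []) := by
  induction acc with
  | nil =>
    simp only [PySem.List.insertBy, List.filter, List.nil_append]
    by_cases hxc : pvKey x == c <;> simp [hxc]
  | cons y ys ih =>
    rw [List.pairwise_cons] at h
    obtain ⟨hy, hys⟩ := h
    simp only [PySem.List.insertBy]
    by_cases hlt : pvKey x < pvKey y
    · rw [if_pos (by simpa using hlt)]
      by_cases hxc : pvKey x == c
      · have hc : pvKey x = c := by simpa using hxc
        have hnil : (y :: ys).filter (fun f => pvKey f == c) = [] := by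
          rw [List.filter_eq_nil_iff]
          intro a ha
          have hge : pvKey y ≤ pvKey a := by
            rcases List.mem_cons.mp ha with rfl | ha
            · exact le_refl _
            · exact hy _ ha
          have hgt : pvKey x < pvKey a := lt_of_lt_of_le hlt hge
          simp only [beq_iff_eq]
          rw [hc] at hgt
          exact fun hh => absurd hh (ne_of_gt hgt)
        simp [hxc, hnil]
      · simp [List.filter_cons, hxc]
    · rw [if_neg (by simpa using hlt)]
      simp only [List.filter_cons]
      rw [ih hys]
      by_cases hyc : pvKey y == c <;> simp [hyc]

theorem pv_foldl_insertBy_filter (c : String) (xs : List (List (String × String))) :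
    ∀ acc, acc.Pairwise (fun a b => pvKey a ≤ pvKey b) →
    (xs.foldl (fun acc x => PySem.List.insertBy (fun a b => decide (pvKey a < pvKey b)) x acc)
        acc).filter (fun f => pvKey f == c) =
      acc.filter (fun f => pvKey f == c) ++ xs.filter (fun f => pvKey f == c) := by
  induction xs with
  | nil => intro acc _; simp
  | cons x xs ih =>
    intro acc hacc
    simp only [List.foldl_cons]
    rw [ih _ (pv_insertBy_pairwise x acc hacc), pv_insertBy_filter_key x acc c hacc,
      List.filter_cons]
    by_cases hxc : pvKey x == c <;> simp [hxc]

theorem pv_sorted_filter (fields : List (List (String × String))) (c : String) :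
    (PySem.List.sorted fields pvKey).filter (fun f => pvKey f == c) =
      fields.filter (fun f => pvKey f == c) := by
  rw [PySem.List.sorted_eq_foldl_insertBy, pv_foldl_insertBy_filter c fields [] (by simp)]
  simp

theorem pv_runs_key_mem (l : List (List (String × String))) :
    ∀ p ∈ pvRuns l, ∃ f ∈ l, p.1 = pvKey f := by
  induction l using pvRuns_induct with
  | h0 => simp [pvRuns, pvRunsF]
  | h1 x xs ih =>
    intro p hp
    rw [pvRuns_cons] at hp
    rcases List.mem_cons.mp hp with rfl | hp
    · exact ⟨x, List.mem_cons_self, rfl⟩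
    · obtain ⟨f, hf, hk⟩ := ih p hp
      exact ⟨f, List.mem_cons_of_mem _ ((List.dropWhile_sublist _).mem hf), hk⟩

theorem pv_mem_runs_key (l : List (List (String × String))) :
    ∀ f ∈ l, pvKey f ∈ (pvRuns l).map (fun p => p.1) := by
  induction l using pvRuns_induct with
  | h0 => simp
  | h1 x xs ih =>
    intro f hf
    rw [pvRuns_cons]
    rcases List.mem_cons.mp hf with rfl | hf
    · simp
    · by_cases ht : f ∈ xs.takeWhile (fun y => pvKey y == pvKey x)
      · have : (pvKey f == pvKey x) = true := List.mem_takeWhile_imp (p := fun y => pvKey y == pvKey x) ht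
        simp only [List.map_cons, List.mem_cons]
        left
        simpa using this
      · have hd : f ∈ xs.dropWhile (fun y => pvKey y == pvKey x) := by
          have := List.takeWhile_append_dropWhile (p := fun y => pvKey y == pvKey x) (l := xs)
          rw [← this] at hf
          rcases List.mem_append.mp hf with h1 | h2
          · exact absurd h1 ht
          · exact h2
        simp only [List.map_cons, List.mem_cons]
        right
        exact ih f hd

theorem pv_drop_gt (x : List (String × String)) (xs : List (List (String × String)))
    (h : (x :: xs).Pairwise (fun a b => pvKey a ≤ pvKey b)) :
    ∀ y ∈ xs.dropWhile (fun y => pvKey y == pvKey x), pvKey x < pvKey y := by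
  induction xs with
  | nil => simp
  | cons a as ih =>
    rw [List.pairwise_cons] at h
    obtain ⟨hx, haas⟩ := h
    rw [List.pairwise_cons] at haas
    obtain ⟨ha2, has⟩ := haas
    by_cases ha : (pvKey a == pvKey x) = true
    · simp only [List.dropWhile_cons, ha, if_true]
      exact ih (List.pairwise_cons.mpr
        ⟨fun b hb => hx b (List.mem_cons_of_mem _ hb), has⟩)
    · have ha' : (pvKey a == pvKey x) = false := by simpa using ha
      simp only [List.dropWhile_cons, ha', Bool.false_eq_true, if_false]
      have hxa : pvKey x < pvKey a := by
        have hne : pvKey a ≠ pvKey x := by simpa using ha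
        exact lt_of_le_of_ne (hx a List.mem_cons_self) (Ne.symm hne)
      intro y hy
      rcases List.mem_cons.mp hy with rfl | hy
      · exact hxa
      · exact lt_of_lt_of_le hxa (ha2 _ hy)

theorem pv_take_filter (x : List (String × String)) (xs : List (List (String × String)))
    (h : (x :: xs).Pairwise (fun a b => pvKey a ≤ pvKey b)) :
    xs.takeWhile (fun y => pvKey y == pvKey x) =
      xs.filter (fun f => pvKey f == pvKey x) := by
  conv_rhs => rw [← List.takeWhile_append_dropWhile (p := fun y => pvKey y == pvKey x) (l := xs)]
  rw [List.filter_append]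
  have h1 : (xs.takeWhile (fun y => pvKey y == pvKey x)).filter
      (fun f => pvKey f == pvKey x) = xs.takeWhile (fun y => pvKey y == pvKey x) :=
    List.filter_eq_self.mpr (fun a ha => List.mem_takeWhile_imp (p := fun y => pvKey y == pvKey x) ha)
  have h2 : (xs.dropWhile (fun y => pvKey y == pvKey x)).filter
      (fun f => pvKey f == pvKey x) = [] := by
    rw [List.filter_eq_nil_iff]
    intro a ha
    have := pv_drop_gt x xs h a ha
    simp only [beq_iff_eq]
    exact fun hh => absurd hh (ne_of_gt this)
  rw [h1, h2, List.append_nil]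

theorem pv_runs_snd (l : List (List (String × String)))
    (h : l.Pairwise (fun a b => pvKey a ≤ pvKey b)) :
    ∀ p ∈ pvRuns l, p.2 = l.filter (fun f => pvKey f == p.1) := by
  induction l using pvRuns_induct with
  | h0 => simp [pvRuns, pvRunsF]
  | h1 x xs ih =>
    intro p hp
    rw [pvRuns_cons] at hp
    have hdp : (xs.dropWhile (fun y => pvKey y == pvKey x)).Pairwise
        (fun a b => pvKey a ≤ pvKey b) :=
      h.sublist ((List.dropWhile_sublist _).cons _)
    rcases List.mem_cons.mp hp with rfl | hp
    · simp only [List.filter_cons, beq_self_eq_true, if_true]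
      rw [pv_take_filter x xs h]
    · obtain ⟨f, hf, hk⟩ := pv_runs_key_mem _ p hp
      have hgt : pvKey x < p.1 := by rw [hk]; exact pv_drop_gt x xs h f hf
      rw [ih hdp p hp]
      conv_rhs => rw [← List.takeWhile_append_dropWhile (p := fun y => pvKey y == pvKey x) (l := xs)]
      rw [List.filter_cons, List.filter_append]
      have hx0 : (pvKey x == p.1) = false := by
        simp only [beq_eq_false_iff_ne]
        exact ne_of_lt hgt
      have ht0 : (xs.takeWhile (fun y => pvKey y == pvKey x)).filter
          (fun f => pvKey f == p.1) = [] := by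
        rw [List.filter_eq_nil_iff]
        intro a ha
        have : (pvKey a == pvKey x) = true := List.mem_takeWhile_imp (p := fun y => pvKey y == pvKey x) ha
        simp only [beq_iff_eq] at this ⊢
        rw [this]
        exact ne_of_lt hgt
      rw [hx0, ht0]
      simp

theorem pv_runs_keys_lt (l : List (List (String × String)))
    (h : l.Pairwise (fun a b => pvKey a ≤ pvKey b)) :
    ((pvRuns l).map (fun p => p.1)).Pairwise (fun a b => a < b) := by
  induction l using pvRuns_induct with
  | h0 => simp [pvRuns, pvRunsF]
  | h1 x xs ih =>
    rw [pvRuns_cons]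
    have hdp : (xs.dropWhile (fun y => pvKey y == pvKey x)).Pairwise
        (fun a b => pvKey a ≤ pvKey b) :=
      h.sublist ((List.dropWhile_sublist _).cons _)
    refine List.pairwise_cons.mpr ⟨?_, ih hdp⟩
    intro b hb
    obtain ⟨p, hp, rfl⟩ := List.mem_map.mp hb
    obtain ⟨f, hf, hk⟩ := pv_runs_key_mem _ p hp
    rw [hk]
    exact pv_drop_gt x xs h f hf

theorem pv_main (fields : List (List (String × String))) :
    group_prefills_by_plugin_py fields = group_prefills_by_plugin_py_alt fields := by
  simp only [group_prefills_by_plugin_py, group_prefills_by_plugin_py_alt]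
  set s := PySem.List.sorted fields pvKey with hs
  have hps : s.Pairwise (fun a b => pvKey a ≤ pvKey b) := PySem.List.sorted_pairwise fields pvKey
  have hlt := pv_runs_keys_lt s hps
  have hnd : ((pvRuns s).map (fun p => p.1)).Nodup := hlt.imp ne_of_lt
  -- A's items
  rw [PySem.Dict.items_foldl_insert_fresh (pvRuns s) (fun r => r.1) (fun r => r.2.map pvAttr)
    PySem.Dict.empty (fun a _ => PySem.Dict.contains_empty _) hnd]
  -- B's grouper
  have hgetD : ∀ c, (fields.foldl
      (fun d f => d.modify (pvKey f) [] (fun v => v ++ [pvAttr f]))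
      PySem.Dict.empty).getD c [] = (fields.filter (fun f => pvKey f == c)).map pvAttr := by
    intro c
    rw [show (fields.foldl (fun d f => d.modify (pvKey f) [] (fun v => v ++ [pvAttr f]))
        PySem.Dict.empty)
      = (fields.map (fun f => (pvKey f, pvAttr f))).foldl
          (fun d p => d.modify p.1 [] (fun v => v ++ [p.2])) PySem.Dict.empty from
      by rw [List.foldl_map]]
    rw [PySem.Dict.getD_foldl_modify_append]
    simp [List.filter_map, List.map_map, Function.comp_def]
  have hkeys : (fields.foldl
      (fun d f => d.modify (pvKey f) [] (fun v => v ++ [pvAttr f]))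
      PySem.Dict.empty).keys = PySem.Set.ofList (fields.map pvKey) := by
    rw [PySem.Dict.keys_foldl_modify_key fields pvKey [] (fun _ x v => v ++ [pvAttr x])
      PySem.Dict.empty]
    rw [PySem.Dict.keys_empty, PySem.Set.update_eq_append_filter]
    simp [PySem.Set.contains]
  rw [hkeys]
  -- identify the sorted key list with the run keys
  have hperm : ((pvRuns s).map (fun p => p.1)).Perm (PySem.Set.ofList (fields.map pvKey)) := by
    rw [List.perm_ext_iff_of_nodup hnd (PySem.Set.nodup_ofList _)]
    intro k
    constructor
    · intro hk
      obtain ⟨p, hp, rfl⟩ := List.mem_map.mp hk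
      obtain ⟨f, hf, hk⟩ := pv_runs_key_mem _ p hp
      have : f ∈ fields := by rw [hs] at hf; exact (PySem.List.mem_sorted _ _ _ _).mp hf
      rw [hk]
      exact (PySem.Set.mem_ofList _ _).mpr (List.mem_map.mpr ⟨f, this, rfl⟩)
    · intro hk
      obtain ⟨f, hf, rfl⟩ := List.mem_map.mp ((PySem.Set.mem_ofList _ _).mp hk)
      exact pv_mem_runs_key s f (by rw [hs]; exact (PySem.List.mem_sorted _ _ _ _).mpr hf)
  rw [PySem.List.sorted_eq_of_perm_of_pairwise_lt _ _ _ hperm hlt]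
  rw [List.map_map]
  apply List.map_congr_left
  intro p hp
  simp only [Function.comp_def]
  rw [hgetD]
  rw [pv_runs_snd s hps p hp, hs, pv_sorted_filter]

-- ===== VERDICT (by name: the statement is the Claim_ definition above) =====
theorem group_prefills_by_plugin_py_spec : Claim_equal_group_prefills_by_plugin_py := by
  intro fields _ _
  unfold Spec_group_prefills_by_plugin_py
  exact pv_main fields
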